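-- pv_equiv track=rewrite | github.com/t3nsor98/100-days-of-code-PYTHON | Q2..py | max_substrings_removed
-- ===== SOURCE A (Python) =====
-- def max_substrings_removed(main_string, substrings):
--     if not substrings:
--         return 0
--
--     maximum_removals = 0
--     for substring in substrings:
--         if substring in main_string:
--             new_string = main_string.replace(substring, "", 1)
--             remaining_substrings = substrings.copy()
--             remaining_substrings.remove(substring)
--             removals = 1 + max_substrings_removed(new_string, remaining_substrings)
--             maximum_removals = max(maximum_removals, removals)
--
--     return maximum_removals
-- ===== SOURCE B (Python) =====
-- def max_substrings_removed(main_string, substrings):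
--     # Memoized search: state = (current string, tuple of remaining substrings);
--     # repeated states (duplicate substrings, commuting removal orders) are solved once.
--     memo = {}
--
--     def solve(s, subs):
--         key = (s, subs)
--         if key in memo:
--             return memo[key]
--         best = 0
--         for sub in subs:
--             if sub in s:
--                 rest = list(subs)
--                 rest.remove(sub)
--                 best = max(best, 1 + solve(s.replace(sub, "", 1), tuple(rest)))
--         memo[key] = best
--         return best
--
--     return solve(main_string, tuple(substrings))
-- ===== Notes on version B (the rewrite author's own statement) =====
-- stated objective: alternative
-- what changed: A's plain exhaustive recursion is replaced by a memoized search keyed on (current string, remaining substrings), threading a result cache through the search so repeated states (duplicate substrings, commuting removal orders) are solved once.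
import Mathlib
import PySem

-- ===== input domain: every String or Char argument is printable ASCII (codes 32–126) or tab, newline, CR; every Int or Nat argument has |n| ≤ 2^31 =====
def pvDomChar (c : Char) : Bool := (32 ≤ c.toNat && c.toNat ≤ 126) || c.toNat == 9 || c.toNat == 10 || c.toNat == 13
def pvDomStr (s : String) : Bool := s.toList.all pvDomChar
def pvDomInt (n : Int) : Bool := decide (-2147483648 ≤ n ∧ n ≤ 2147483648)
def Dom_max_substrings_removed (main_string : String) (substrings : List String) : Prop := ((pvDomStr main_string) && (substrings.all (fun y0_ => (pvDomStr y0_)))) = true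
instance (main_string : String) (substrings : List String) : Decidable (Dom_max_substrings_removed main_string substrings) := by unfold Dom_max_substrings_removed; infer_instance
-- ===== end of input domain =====

-- B threads a memo over (current string, remaining substrings) states through A's exhaustive removal search (objective: alternative decomposition; no speed claim).


-- ===== PORT A =====
-- s.replace(sub, "", 1): exact — removes the FIRST occurrence of sub (Chars.find points at it);
-- if sub does not occur (find = -1) the string is unchanged, as in Python.
def pyRemoveFirst (s sub : List Char) : List Char :=
  let i := PySem.Chars.find s sub
  if i = -1 then s else s.take i.toNat ++ s.drop (i.toNat + sub.length)

-- A's recursion, fuel = length of the substring list (each recursive call removes one element,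
-- so fuel exactly tracks the list length; the fuel-0 body is the general body at subs = []).
def goA : Nat → List Char → List (List Char) → Int
  | 0, _, _ => 0
  | fuel + 1, s, subs =>
    if subs = [] then 0
    else
      subs.foldl
        (fun best sub =>
          if PySem.Chars.isIn sub s then
            max best (1 + goA fuel (pyRemoveFirst s sub) (subs.erase sub))
          else best) 0

def max_substrings_removed (main_string : String) (substrings : List String) : Int :=
  goA substrings.length main_string.toList (substrings.map String.toList)

-- ===== PORT B =====
-- B's memoized recursion: memo maps (current string, remaining substrings) to the answer.
def goB : Nat → List Char → List (List Char) →
    PySem.Dict (List Char × List (List Char)) Int →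
    Int × PySem.Dict (List Char × List (List Char)) Int
  | fuel, s, subs, memo =>
    match memo.get? (s, subs) with
    | some v => (v, memo)
    | none =>
      match fuel with
      | 0 => (0, memo.insert (s, subs) 0)   -- fuel = subs.length, so subs = [] here: loop body over []
      | fuel + 1 =>
        let r := subs.foldl
          (fun (acc : Int × PySem.Dict (List Char × List (List Char)) Int) sub =>
            if PySem.Chars.isIn sub s then
              let rec' := goB fuel (pyRemoveFirst s sub) (subs.erase sub) acc.2
              (max acc.1 (1 + rec'.1), rec'.2)
            else acc) (0, memo)
        (r.1, r.2.insert (s, subs) r.1)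

def max_substrings_removed_alt (main_string : String) (substrings : List String) : Int :=
  (goB substrings.length main_string.toList (substrings.map String.toList) PySem.Dict.empty).1

-- ===== PRECONDITION & SPEC =====
def Spec_max_substrings_removed (main_string : String) (substrings : List String) (out : Int) : Prop := out = max_substrings_removed_alt main_string substrings
instance (main_string : String) (substrings : List String) (out : Int) : Decidable (Spec_max_substrings_removed main_string substrings out) := by unfold Spec_max_substrings_removed; infer_instance

-- ===== CLAIM (what is proved, stated in full; the proofs are below) =====
def Claim_equal_max_substrings_removed : Prop := ∀ (main_string : String) (substrings : List String), Dom_max_substrings_removed main_string substrings → Spec_max_substrings_removed main_string substrings (max_substrings_removed main_string substrings)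

-- ===== LEMMAS AND PROOFS =====

-- every memo entry holds A's value for its key
def MemoInv (memo : PySem.Dict (List Char × List (List Char)) Int) : Prop :=
  ∀ k v, memo.get? k = some v → v = goA k.2.length k.1 k.2

theorem memoInv_insert (memo : PySem.Dict (List Char × List (List Char)) Int)
    (s : List Char) (subs : List (List Char)) (v : Int)
    (h : MemoInv memo) (hv : v = goA subs.length s subs) :
    MemoInv (memo.insert (s, subs) v) := by
  intro k w hw
  by_cases hk : k = (s, subs)
  · subst hk
    rw [PySem.Dict.get?_insert_self] at hw
    cases hw
    exact hv
  · rw [PySem.Dict.get?_insert_of_ne memo v hk] at hw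
    exact h k w hw

theorem goB_correct : ∀ (fuel : Nat) (s : List Char) (subs : List (List Char))
    (memo : PySem.Dict (List Char × List (List Char)) Int),
    subs.length ≤ fuel → MemoInv memo →
    (goB fuel s subs memo).1 = goA subs.length s subs ∧ MemoInv (goB fuel s subs memo).2 := by
  intro fuel
  induction fuel with
  | zero =>
    intro s subs memo hlen hinv
    have hs : subs = [] := by cases subs <;> simp_all
    subst hs
    rw [goB]
    cases hm : memo.get? (s, []) with
    | some v =>
      exact ⟨hinv (s, []) v hm, hinv⟩
    | none =>
      exact ⟨rfl, memoInv_insert memo s [] 0 hinv rfl⟩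
  | succ fuel IH =>
    intro s subs memo hlen hinv
    rw [goB]
    cases hm : memo.get? (s, subs) with
    | some v =>
      exact ⟨hinv (s, subs) v hm, hinv⟩
    | none =>
      by_cases hnil : subs = []
      · subst hnil
        simp only [List.foldl_nil]
        exact ⟨rfl, memoInv_insert memo s [] 0 hinv rfl⟩
      · obtain ⟨m, hm2⟩ : ∃ m, subs.length = m + 1 :=
          ⟨subs.length - 1, by cases subs <;> simp_all⟩
        have hfold : ∀ (l : List (List Char))
            (acc : Int × PySem.Dict (List Char × List (List Char)) Int),
            (∀ x ∈ l, x ∈ subs) → MemoInv acc.2 →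
            (l.foldl
              (fun acc sub =>
                if PySem.Chars.isIn sub s then
                  let rec' := goB fuel (pyRemoveFirst s sub) (subs.erase sub) acc.2
                  (max acc.1 (1 + rec'.1), rec'.2)
                else acc) acc).1 =
              l.foldl
                (fun best sub =>
                  if PySem.Chars.isIn sub s then
                    max best (1 + goA m (pyRemoveFirst s sub) (subs.erase sub))
                  else best) acc.1 ∧
            MemoInv (l.foldl
              (fun acc sub =>
                if PySem.Chars.isIn sub s then
                  let rec' := goB fuel (pyRemoveFirst s sub) (subs.erase sub) acc.2
                  (max acc.1 (1 + rec'.1), rec'.2)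
                else acc) acc).2 := by
          intro l
          induction l with
          | nil => intro acc _ hia; exact ⟨rfl, hia⟩
          | cons x t ih2 =>
            intro acc hmem hia
            simp only [List.foldl_cons]
            by_cases hx : PySem.Chars.isIn x s
            · have hxin : x ∈ subs := hmem x (List.mem_cons_self)
              have herase : (subs.erase x).length = m := by
                rw [List.length_erase_of_mem hxin]; omega
              have hrec := IH (pyRemoveFirst s x) (subs.erase x) acc.2
                (by omega) hia
              rw [herase] at hrec
              simp only [hx, if_true]
              rw [hrec.1]
              exact ih2 (max acc.1 (1 + goA m (pyRemoveFirst s x) (subs.erase x)),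
                  (goB fuel (pyRemoveFirst s x) (subs.erase x) acc.2).2)
                (fun y hy => hmem y (List.mem_cons_of_mem x hy)) hrec.2
            · simp only [hx]
              exact ih2 acc (fun y hy => hmem y (List.mem_cons_of_mem x hy)) hia
        have hres := hfold subs (0, memo) (fun _ h => h) hinv
        have hA : goA subs.length s subs =
            subs.foldl
              (fun best sub =>
                if PySem.Chars.isIn sub s then
                  max best (1 + goA m (pyRemoveFirst s sub) (subs.erase sub))
                else best) 0 := by
          rw [hm2, goA]
          simp [hnil]
        refine ⟨by rw [hA]; exact hres.1, ?_⟩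
        exact memoInv_insert _ s subs _ hres.2 (by rw [hA]; exact hres.1)

theorem max_substrings_removed_spec : Claim_equal_max_substrings_removed := by
  intro ms subs _
  unfold Spec_max_substrings_removed max_substrings_removed max_substrings_removed_alt
  have h := goB_correct (subs.map String.toList).length ms.toList (subs.map String.toList)
    PySem.Dict.empty le_rfl (by intro k v hv; simp [PySem.Dict.get?_empty] at hv)
  simp only [List.length_map] at h ⊢
  exact h.1.symm
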